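-- pv_equiv track=rewrite | github.com/kimSooHyun950921/algoritm | soohyun/python/baekjoon/0630/1339/2.py | count_alpha
-- ===== SOURCE A (Python) =====
-- def count_alpha(alpha_list):
--     alpha_dict = dict()
--     for word in alpha_list:
--         size = len(word)
--         for idx, value in enumerate(word):
--             if alpha_dict.get(value, -1) < 0:
--                 alpha_dict[value] = 10 ** (size-(idx+1))
--             else:
--                 alpha_dict[value] += 10 ** (size-(idx+1))
--     return alpha_dict
-- ===== SOURCE B (Python) =====
-- def count_alpha(alpha_list):
--     # Group-by-letter: collect letters in first-occurrence order, then for each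
--     # letter evaluate, per word, the 0/1-indicator number by Horner's rule and sum.
--     letters = list(dict.fromkeys(ch for word in alpha_list for ch in word))
--     result = {}
--     for c in letters:
--         total = 0
--         for word in alpha_list:
--             v = 0
--             for ch in word:
--                 v = 10 * v + (ch == c)
--             total += v
--         result[c] = total
--     return result
-- ===== Notes on version B (the rewrite author's own statement) =====
-- stated objective: alternative
-- what changed: B groups by letter instead of accumulating a dict in one pass: it first collects the letters in first-occurrence order, then for each letter sums, over all words, the 0/1-indicator number of that letter's positions evaluated by Horner's rule (10*v + (ch==c)), with no exponentiation and no insert-or-add branch.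
import Mathlib
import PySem

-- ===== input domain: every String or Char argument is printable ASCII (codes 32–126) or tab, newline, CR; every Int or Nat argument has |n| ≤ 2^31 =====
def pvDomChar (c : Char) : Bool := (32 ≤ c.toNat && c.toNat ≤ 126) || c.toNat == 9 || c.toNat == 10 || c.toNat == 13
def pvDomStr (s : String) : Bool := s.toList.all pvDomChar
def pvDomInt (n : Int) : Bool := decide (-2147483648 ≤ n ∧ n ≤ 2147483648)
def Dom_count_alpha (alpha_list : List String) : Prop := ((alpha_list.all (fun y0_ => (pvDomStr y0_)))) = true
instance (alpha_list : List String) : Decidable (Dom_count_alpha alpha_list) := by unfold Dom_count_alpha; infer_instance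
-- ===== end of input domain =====

-- B groups by letter (letters in first-occurrence order, then per letter a Horner-rule
-- indicator sum over all words) instead of A's one-pass dict accumulation of powers of 10
-- (objective: alternative).

-- ===== PORT A =====
-- one enumerate step of A's inner loop: the branch on alpha_dict.get(value, -1) < 0
def pvStepA (size : Int) (d : PySem.Dict String Int) (p : Int × Char) : PySem.Dict String Int :=
  let value := String.ofList [p.2]
  if d.getD value (-1) < 0 then
    d.insert value (10 ^ (size - (p.1 + 1)).toNat)
  else
    -- alpha_dict[value] += …  (key present in this branch, so modify with any default is exact)
    d.modify value 0 (· + 10 ^ (size - (p.1 + 1)).toNat)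

def count_alpha (alpha_list : List String) : List (String × Int) :=
  (alpha_list.foldl
    (fun d word =>
      let size : Int := word.toList.length
      (PySem.List.enumerate word.toList).foldl (pvStepA size) d)
    PySem.Dict.empty).items

-- ===== PORT B =====
-- v = 10 * v + (ch == c)  — Horner evaluation of the 0/1 indicator number of letter c in a word
def pvHorner (c : String) (l : List Char) : Int :=
  l.foldl (fun v ch => 10 * v + (if String.ofList [ch] == c then 1 else 0)) 0

-- total = sum over all words of the Horner indicator value
def pvTotal (ws : List String) (c : String) : Int :=
  ws.foldl (fun t w => t + pvHorner c w.toList) 0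

def count_alpha_alt (alpha_list : List String) : List (String × Int) :=
  -- letters = list(dict.fromkeys(ch for word in alpha_list for ch in word)); then result[c] = total
  ((PySem.List.dedup (alpha_list.flatMap (fun w => w.toList.map (fun ch => String.ofList [ch])))).foldl
    (fun d c => d.insert c (pvTotal alpha_list c)) PySem.Dict.empty).items

-- ===== PRECONDITION & SPEC =====
def Spec_count_alpha (alpha_list : List String) (out : List (String × Int)) : Prop := out = count_alpha_alt alpha_list
instance (alpha_list : List String) (out : List (String × Int)) : Decidable (Spec_count_alpha alpha_list out) := by unfold Spec_count_alpha; infer_instance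

-- ===== CLAIM (what is proved, stated in full; the proofs are below) =====
def Claim_equal_count_alpha : Prop := ∀ (alpha_list : List String), Dom_count_alpha alpha_list → Spec_count_alpha alpha_list (count_alpha alpha_list)

-- ===== LEMMAS AND PROOFS =====

-- the (key, weight) stream of one word: position i of a word of length n carries 10^(n-i-1)
def pvW : List Char → List (String × Int)
  | [] => []
  | c :: t => (String.ofList [c], 10 ^ t.length) :: pvW t

-- the whole stream of the input
def pvS (ws : List String) : List (String × Int) := ws.flatMap (fun w => pvW w.toList)

-- sum of the weights carried by key k in a stream
def pvWsum (k : String) : List (String × Int) → Int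
  | [] => 0
  | p :: t => (if p.1 = k then p.2 else 0) + pvWsum k t

-- the plain insert-(getD+w) fold the branchy A-step reduces to
def pvAdd (d : PySem.Dict String Int) (S : List (String × Int)) : PySem.Dict String Int :=
  S.foldl (fun d p => d.insert p.1 (d.getD p.1 0 + p.2)) d

theorem pv_mem_values_of_get? (d : PySem.Dict String Int) (k : String) (v : Int)
    (h : d.get? k = some v) : v ∈ d.values :=
  List.mem_map.mpr ⟨(k, v), PySem.Dict.mem_items_of_get?_eq_some d h, rfl⟩

-- one A-step: under the positivity invariant the branch equals one insert of getD+10^m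
theorem pv_step_eq (d : PySem.Dict String Int) (hd : ∀ v ∈ d.values, 0 < v)
    (c : Char) (s : Int) (size : Int) (m : Nat) (hm : size - (s + 1) = (m : Int)) :
    pvStepA size d (s, c) = d.insert (String.ofList [c]) (d.getD (String.ofList [c]) 0 + 10 ^ m) := by
  unfold pvStepA
  dsimp only
  simp only [hm, Int.toNat_natCast]
  rcases h : d.get? (String.ofList [c]) with _ | v
  · rw [PySem.Dict.getD_of_get?_eq_none d (-1) h, if_pos (by norm_num),
      PySem.Dict.getD_of_get?_eq_none d 0 h]
    norm_num
  · have hv : 0 < v := hd v (pv_mem_values_of_get? d _ v h)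
    rw [PySem.Dict.getD_of_get?_eq_some d (-1) h, if_neg (by omega),
      show (d.modify (String.ofList [c]) 0 (· + 10 ^ m))
          = d.insert (String.ofList [c]) (d.getD (String.ofList [c]) 0 + 10 ^ m) from rfl,
      PySem.Dict.getD_of_get?_eq_some d 0 h]

theorem pv_values_insert_pos (d : PySem.Dict String Int) (hd : ∀ v ∈ d.values, 0 < v)
    (k : String) (m : Nat) :
    ∀ v ∈ (d.insert k (d.getD k 0 + 10 ^ m)).values, 0 < v := by
  intro v hv
  rcases PySem.Dict.mem_values_insert d k _ v hv with h | h
  · subst h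
    have h0 : (0 : Int) ≤ d.getD k 0 := by
      rcases hg : d.get? k with _ | w
      · rw [PySem.Dict.getD_of_get?_eq_none d 0 hg]
      · rw [PySem.Dict.getD_of_get?_eq_some d 0 hg]
        exact le_of_lt (hd w (pv_mem_values_of_get? d _ w hg))
    have h1 : (0 : Int) < 10 ^ m := by positivity
    omega
  · exact hd v h

-- A's inner loop over `enumerate l s` equals the add-fold over the stream pvW l
theorem pv_inner (l : List Char) (s : Int) (size : Int) (hsize : size = s + l.length)
    (d : PySem.Dict String Int) (hd : ∀ v ∈ d.values, 0 < v) :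
    (PySem.List.enumerate l s).foldl (pvStepA size) d = pvAdd d (pvW l) := by
  induction l generalizing s d with
  | nil => simp [PySem.List.enumerate_nil, pvW, pvAdd]
  | cons c t ih =>
    rw [PySem.List.enumerate_cons, List.foldl_cons]
    have hm : size - (s + 1) = (t.length : Int) := by
      simp only [List.length_cons] at hsize; push_cast at hsize ⊢; omega
    rw [pv_step_eq d hd c s size t.length hm]
    show _ = pvAdd d ((String.ofList [c], 10 ^ t.length) :: pvW t)
    unfold pvAdd
    rw [List.foldl_cons]
    exact ih (s + 1)
      (by simp only [List.length_cons] at hsize; push_cast at hsize ⊢; omega)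
      _ (pv_values_insert_pos d hd _ _)

-- the add-fold over a word stream preserves the positivity invariant
theorem pv_add_pos (l : List Char) (d : PySem.Dict String Int) (hd : ∀ v ∈ d.values, 0 < v) :
    ∀ v ∈ (pvAdd d (pvW l)).values, 0 < v := by
  induction l generalizing d with
  | nil => exact hd
  | cons c t ih =>
    show ∀ v ∈ (pvAdd _ (pvW t)).values, 0 < v
    exact ih _ (pv_values_insert_pos d hd _ _)

-- A's whole computation is the add-fold over the whole stream
theorem pv_a_eq_add (ws : List String) (d : PySem.Dict String Int) (hd : ∀ v ∈ d.values, 0 < v) :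
    ws.foldl (fun d word =>
        let size : Int := word.toList.length
        (PySem.List.enumerate word.toList).foldl (pvStepA size) d) d
      = pvAdd d (pvS ws) := by
  induction ws generalizing d with
  | nil => simp [pvS, pvAdd]
  | cons w t ih =>
    rw [List.foldl_cons]
    simp only
    rw [pv_inner w.toList 0 w.toList.length (by simp) d hd]
    rw [ih _ (pv_add_pos w.toList d hd)]
    show pvAdd (pvAdd d (pvW w.toList)) (pvS t) = pvAdd d (pvS (w :: t))
    unfold pvS pvAdd
    rw [List.flatMap_cons, List.foldl_append]

-- lookup after the add-fold: the old value plus the key's weight sum in the stream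
theorem pv_getD_add (S : List (String × Int)) (d : PySem.Dict String Int) (k : String) :
    (pvAdd d S).getD k 0 = d.getD k 0 + pvWsum k S := by
  induction S generalizing d with
  | nil => simp [pvAdd, pvWsum]
  | cons p t ih =>
    show (pvAdd (d.insert p.1 (d.getD p.1 0 + p.2)) t).getD k 0 = _
    rw [ih]
    rw [PySem.Dict.getD_insert]
    by_cases h : k = p.1
    · subst h; simp [pvWsum]; ring
    · simp [pvWsum, h, Ne.symm h]

-- keys after the add-fold from empty: first-occurrence dedup of the stream's keys
theorem pv_keys_add (S : List (String × Int)) :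
    (pvAdd PySem.Dict.empty S).keys = PySem.Set.ofList (S.map (·.1)) := by
  unfold pvAdd
  rw [PySem.Dict.keys_foldl_insert_key S Prod.fst (fun d x => d.getD x.1 0 + x.2) PySem.Dict.empty]
  rw [PySem.Dict.keys_empty, PySem.Set.update_nil_left]

theorem pv_nodup_keys_add (S : List (String × Int)) :
    (pvAdd PySem.Dict.empty S).keys.Nodup := by
  unfold pvAdd
  exact PySem.Dict.nodup_keys_foldl_insert_key S Prod.fst _ _ PySem.Dict.nodup_keys_empty

-- Horner from accumulator v: v·10^len plus the key's weight sum over this word's stream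
theorem pv_horner_eq (c : String) (l : List Char) (v : Int) :
    l.foldl (fun v ch => 10 * v + (if String.ofList [ch] == c then 1 else 0)) v
      = v * 10 ^ l.length + pvWsum c (pvW l) := by
  induction l generalizing v with
  | nil => simp [pvW, pvWsum]
  | cons ch t ih =>
    rw [List.foldl_cons, ih]
    show _ = v * 10 ^ (t.length + 1) + ((if String.ofList [ch] = c then (10:Int) ^ t.length else 0) + pvWsum c (pvW t))
    by_cases h : String.ofList [ch] = c <;> simp [h, pow_succ] <;> ring

-- B's per-letter total is the key's weight sum over the whole stream
theorem pv_total_eq (ws : List String) (c : String) :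
    pvTotal ws c = pvWsum c (pvS ws) := by
  unfold pvTotal
  have step : ∀ (t : Int) (l : List String),
      l.foldl (fun t w => t + pvHorner c w.toList) t = t + pvWsum c (pvS l) := by
    intro t l
    induction l generalizing t with
    | nil => simp [pvS, pvWsum]
    | cons w r ih =>
      rw [List.foldl_cons, ih]
      have hsplit : pvWsum c (pvS (w :: r)) = pvWsum c (pvW w.toList) + pvWsum c (pvS r) := by
        show pvWsum c (pvW w.toList ++ pvS r) = _
        induction pvW w.toList with
        | nil => simp [pvWsum]
        | cons p q ihq => simp [pvWsum, ihq]; ring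
      rw [hsplit]
      unfold pvHorner
      rw [pv_horner_eq]
      ring
  rw [step 0 ws, zero_add]

-- the streams' key list is B's flat single-char-string list
theorem pv_keys_stream (ws : List String) :
    (pvS ws).map (·.1) = ws.flatMap (fun w => w.toList.map (fun ch => String.ofList [ch])) := by
  unfold pvS
  rw [List.map_flatMap]
  congr 1
  funext w
  induction w.toList with
  | nil => rfl
  | cons c t ih => simp [pvW, ih]

-- ===== VERDICT (by name: the statement is the Claim_ definition above) =====
theorem count_alpha_spec : Claim_equal_count_alpha := by
  intro alpha_list _
  show count_alpha alpha_list = count_alpha_alt alpha_list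
  unfold count_alpha count_alpha_alt
  rw [pv_a_eq_add alpha_list PySem.Dict.empty (by simp [PySem.Dict.values, PySem.Dict.empty])]
  -- left: items of the add-fold; rewrite as keys.map (k, getD k 0)
  rw [PySem.Dict.items_eq_map_keys _ (pv_nodup_keys_add _) 0]
  rw [pv_keys_add]
  -- right: items of B's fresh-key fold
  have hletters : PySem.List.dedup (alpha_list.flatMap (fun w => w.toList.map (fun ch => String.ofList [ch])))
      = PySem.Set.ofList ((pvS alpha_list).map (·.1)) := by
    rw [pv_keys_stream, PySem.List.dedup_eq_ofList]
  rw [hletters]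
  have hB := PySem.Dict.items_foldl_insert_fresh
        (PySem.Set.ofList ((pvS alpha_list).map (·.1))) id (fun c => pvTotal alpha_list c)
        PySem.Dict.empty
        (by intro a _; exact PySem.Dict.contains_empty a)
        (by rw [List.map_id]; exact PySem.Set.nodup_ofList _)
  simp only [id_eq] at hB
  rw [hB, show (PySem.Dict.empty : PySem.Dict String Int).items = [] from rfl, List.nil_append]
  apply List.map_congr_left
  intro k _
  rw [pv_getD_add, pv_total_eq,
    show (PySem.Dict.empty : PySem.Dict String Int).getD k 0 = 0 from rfl, zero_add]
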